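-- pv_equiv track=rewrite | github.com/Beremi/fenics_nonlinear_energies | src/problems/plaplace_u3/thesis/solver_mpa.py | _detect_peak_cycle
-- ===== SOURCE A (Python) =====
-- def _detect_peak_cycle(node_history: list[int]) -> bool:
--     if len(node_history) < 8:
--         return False
--     for cycle_len in range(1, 5):
--         if len(node_history) < 2 * cycle_len:
--             continue
--         for end in range(2 * cycle_len, len(node_history) + 1):
--             first = node_history[end - 2 * cycle_len : end - cycle_len]
--             second = node_history[end - cycle_len : end]
--             if first == second:
--                 return True
--     return False
-- ===== SOURCE B (Python) =====
-- def _detect_peak_cycle(node_history: list[int]) -> bool: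
--     n = len(node_history)
--     if n < 8:
--         return False
--     for cycle_len in range(1, 5):
--         run = 0
--         for i in range(n - cycle_len):
--             if node_history[i] == node_history[i + cycle_len]:
--                 run += 1
--                 if cycle_len <= run:
--                     return True
--             else:
--                 run = 0
--     return False
-- ===== Notes on version B (the rewrite author's own statement) =====
-- stated objective: faster
-- what changed: Replaces the per-end-position construction and comparison of two length-c slices with a single linear scan per cycle length that keeps a running count of consecutive lag-c matches, returning True when the count reaches c.
import Mathlib
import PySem

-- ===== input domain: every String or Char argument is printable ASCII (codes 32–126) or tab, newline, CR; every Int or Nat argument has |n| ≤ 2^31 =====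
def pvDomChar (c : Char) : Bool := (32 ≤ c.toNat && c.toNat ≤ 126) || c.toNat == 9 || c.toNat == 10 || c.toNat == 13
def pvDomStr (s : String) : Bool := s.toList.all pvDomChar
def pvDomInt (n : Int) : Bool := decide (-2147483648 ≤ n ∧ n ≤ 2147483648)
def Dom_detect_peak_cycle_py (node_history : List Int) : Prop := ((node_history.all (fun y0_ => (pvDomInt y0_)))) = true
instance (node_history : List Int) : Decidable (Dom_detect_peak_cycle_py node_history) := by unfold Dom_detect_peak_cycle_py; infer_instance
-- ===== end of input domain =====

-- B replaces the per-end slice comparisons with one linear run-counting scan per cycle length (same return value; measured speedup is constant-factor).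
-- ===== PORT A =====
def detect_peak_cycle_py (node_history : List Int) : Bool :=
  if node_history.length < 8 then false
  else
    (PySem.List.pyRange 1 5 1).any (fun cycle_len =>
      if (node_history.length : Int) < 2 * cycle_len then false
      else
        (PySem.List.pyRange (2 * cycle_len) ((node_history.length : Int) + 1) 1).any (fun e =>
          PySem.List.slice node_history (some (e - 2 * cycle_len)) (some (e - cycle_len))
            == PySem.List.slice node_history (some (e - cycle_len)) (some e)))

-- ===== PORT B =====
def detect_peak_cycle_py_alt (node_history : List Int) : Bool :=
  let n := node_history.length
  if n < 8 then false
  else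
    (PySem.List.pyRange 1 5 1).any (fun cycle_len =>
      ((PySem.List.pyRange 0 ((n : Int) - cycle_len) 1).foldl
        (fun st i =>
          if st.1 then st
          else if PySem.List.pyGetD node_history i 0 == PySem.List.pyGetD node_history (i + cycle_len) 0 then
            if cycle_len ≤ st.2 + 1 then (true, st.2 + 1) else (false, st.2 + 1)
          else (false, (0 : Int)))
        (false, (0 : Int))).1)

-- ===== PRECONDITION & SPEC =====
def Spec_detect_peak_cycle_py (node_history : List Int) (out : Bool) : Prop := out = detect_peak_cycle_py_alt node_history
instance (node_history : List Int) (out : Bool) : Decidable (Spec_detect_peak_cycle_py node_history out) := by unfold Spec_detect_peak_cycle_py; infer_instance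

-- ===== CLAIM (what is proved, stated in full; the proofs are below) =====
def Claim_equal_detect_peak_cycle_py : Prop := ∀ (node_history : List Int), Dom_detect_peak_cycle_py node_history → Spec_detect_peak_cycle_py node_history (detect_peak_cycle_py node_history)


-- ===== LEMMAS AND PROOFS =====
def mAt (h : List Int) (c j : Nat) : Bool := h.getD j 0 == h.getD (j + c) 0

def trailN (h : List Int) (c : Nat) : Nat → Nat
  | 0 => 0
  | p+1 => if mAt h c p then trailN h c p + 1 else 0

def fndN (h : List Int) (c : Nat) : Nat → Bool
  | 0 => false
  | p+1 => fndN h c p || (mAt h c p && decide (c ≤ trailN h c p + 1))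

theorem trailN_le (h : List Int) (c : Nat) : ∀ p, trailN h c p ≤ p := by
  intro p; induction p with
  | zero => simp [trailN]
  | succ p ih => simp only [trailN]; split <;> omega

theorem trailN_ge (h : List Int) (c : Nat) :
    ∀ p t, t ≤ p → (t ≤ trailN h c p ↔ ∀ j, p - t ≤ j → j < p → mAt h c j = true) := by
  intro p; induction p with
  | zero => intro t ht; interval_cases t; simp [trailN]
  | succ p ih =>
    intro t ht
    match t with
    | 0 => simpa using fun j h1 h2 => absurd h2 (by omega)
    | t+1 =>
      simp only [trailN]
      by_cases hm : mAt h c p = true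
      · rw [if_pos hm]
        constructor
        · intro hle j hj1 hj2
          rcases Nat.lt_succ_iff_lt_or_eq.mp hj2 with hlt | rfl
          · exact ((ih t (by omega)).mp (by omega)) j (by omega) hlt
          · exact hm
        · intro hall
          have : t ≤ trailN h c p := (ih t (by omega)).mpr (fun j hj1 hj2 => hall j (by omega) (by omega))
          omega
      · simp only [if_neg hm]
        constructor
        · omega
        · intro hall; exact absurd (hall p (by omega) (by omega)) hm

theorem fndN_iff (h : List Int) (c : Nat) (hc : 0 < c) :
    ∀ m, (fndN h c m = true ↔ ∃ s, s + c ≤ m ∧ ∀ j, j < c → mAt h c (s + j) = true) := by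
  intro m; induction m with
  | zero => simp [fndN]; omega
  | succ m ih =>
    simp only [fndN, Bool.or_eq_true, Bool.and_eq_true, decide_eq_true_eq, ih]
    constructor
    · rintro (⟨s, hs, hw⟩ | ⟨hm, hle⟩)
      · exact ⟨s, by omega, hw⟩
      · -- window ending exactly at m+1 : s = m+1-c
        have hcm : c ≤ m + 1 := by have := trailN_le h c m; omega
        refine ⟨m + 1 - c, by omega, ?_⟩
        intro j hj
        rcases Nat.lt_or_ge (m + 1 - c + j) m with hlt | hge
        · exact ((trailN_ge h c m (c-1) (by omega)).mp (by omega)) _ (by omega) hlt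
        · have : m + 1 - c + j = m := by omega
          rw [this]; exact hm
    · rintro ⟨s, hs, hw⟩
      rcases Nat.lt_or_ge (s + c) (m + 1) with hlt | hge
      · exact Or.inl ⟨s, by omega, hw⟩
      · have hse : s + c = m + 1 := by omega
        right
        have hm : mAt h c m = true := by
          have := hw (c-1) (by omega); rwa [show s + (c-1) = m by omega] at this
        refine ⟨hm, ?_⟩
        have : c - 1 ≤ trailN h c m := by
          apply (trailN_ge h c m (c-1) (by omega)).mpr
          intro j hj1 hj2
          have := hw (j - s) (by omega); rwa [show s + (j - s) = j by omega] at this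
        omega

def stepB (h : List Int) (c : Nat) (st : Bool × Int) (j : Nat) : Bool × Int :=
  if st.1 then st
  else if mAt h c j then (if (c : Int) ≤ st.2 + 1 then (true, st.2 + 1) else (false, st.2 + 1))
  else (false, 0)

theorem foldB_inv (h : List Int) (c : Nat) :
    ∀ m, ((List.range m).foldl (stepB h c) (false, 0)).1 = fndN h c m ∧
      (((List.range m).foldl (stepB h c) (false, 0)).1 = false →
        ((List.range m).foldl (stepB h c) (false, 0)).2 = (trailN h c m : Int)) := by
  intro m; induction m with
  | zero => simp [fndN, trailN]
  | succ m ih =>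
    rw [List.range_succ, List.foldl_append]
    obtain ⟨ih1, ih2⟩ := ih
    set r := (List.range m).foldl (stepB h c) (false, 0) with hr
    simp only [List.foldl_cons, List.foldl_nil]
    by_cases hf : r.1 = true
    · have hstep : stepB h c r m = r := by simp [stepB, hf]
      rw [hstep]
      refine ⟨by simp [fndN, ← ih1, hf], fun h' => by rw [hf] at h'; simp at h'⟩
    · have hf' : r.1 = false := by simpa using hf
      have hr2 : r.2 = (trailN h c m : Int) := ih2 hf'
      simp only [stepB, Bool.false_eq_true, if_false, fndN, ← ih1, hf', Bool.false_or]
      by_cases hm : mAt h c m = true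
      · rw [if_pos hm, hm]
        by_cases hcle : (c : Int) ≤ r.2 + 1
        · rw [if_pos hcle]
          have : decide (c ≤ trailN h c m + 1) = true := by
            rw [hr2] at hcle; simp; omega
          simp [this]
        · rw [if_neg hcle]
          have hd : decide (c ≤ trailN h c m + 1) = false := by
            rw [hr2] at hcle; simp; omega
          refine ⟨by simp [hd], fun _ => ?_⟩
          simp only [trailN, if_pos hm, hr2]; push_cast; ring
      · have hm' : mAt h c m = false := by simpa using hm
        rw [if_neg (by simp [hm']), hm']
        exact ⟨by simp, fun _ => by simp [trailN, hm']⟩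

theorem mAt_iff (h : List Int) (c j : Nat) (hj : j + c < h.length) :
    mAt h c j = true ↔ h[j]'(by omega) = h[j + c]'hj := by
  rw [mAt, beq_iff_eq, List.getD_eq_getElem h 0 (by omega), List.getD_eq_getElem h 0 hj]

theorem A_window (h : List Int) (c s : Nat) (hs : s + 2 * c ≤ h.length) :
    ((h.drop s).take c == (h.drop (s + c)).take c) = true ↔
      ∀ j, j < c → mAt h c (s + j) = true := by
  rw [beq_iff_eq]
  constructor
  · intro he j hj
    have h2 : s + j + c < h.length := by omega
    have := congrArg (fun l => l[j]?) he
    simp only [List.getElem?_take, hj, if_pos, List.getElem?_drop] at this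
    rw [List.getElem?_eq_getElem (show s + j < h.length by omega),
        List.getElem?_eq_getElem (show s + c + j < h.length by omega)] at this
    rw [mAt_iff h c (s + j) h2]
    have := Option.some.inj this
    rw [this]; congr 1; omega
  · intro hw
    apply List.ext_getElem?
    intro j
    by_cases hj : j < c
    · simp only [List.getElem?_take, hj, if_pos, List.getElem?_drop]
      have h2 : s + j + c < h.length := by omega
      have := (mAt_iff h c (s + j) h2).mp (hw j hj)
      rw [List.getElem?_eq_getElem (show s + j < h.length by omega),
          List.getElem?_eq_getElem (show s + c + j < h.length by omega)]
      congr 1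
      rw [this]; congr 1; omega
    · have hl1 : ((h.drop s).take c).length ≤ j := by
        simp [List.length_take, List.length_drop]; omega
      have hl2 : ((h.drop (s + c)).take c).length ≤ j := by
        simp [List.length_take, List.length_drop]; omega
      rw [List.getElem?_eq_none hl1, List.getElem?_eq_none hl2]

theorem A_pred_iff (h : List Int) (c : Nat) (e : Int) (h2c : 2 * (c : Int) ≤ e)
    (hen : e ≤ (h.length : Int)) :
    ((PySem.List.slice h (some (e - 2 * (c : Int))) (some (e - (c : Int))) ==
        PySem.List.slice h (some (e - (c : Int))) (some e)) = true) ↔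
      ∀ j, j < c → mAt h c ((e - 2 * (c : Int)).toNat + j) = true := by
  set s := (e - 2 * (c : Int)).toNat with hs
  have hB : (e - (c : Int)).toNat = s + c := by omega
  have hC : e.toNat = s + 2 * c := by omega
  rw [PySem.List.slice_toNat h (by omega) (by omega),
      PySem.List.slice_toNat h (by omega) (by omega), ← hs, hB, hC]
  have hd1 : s + c - s = c := by omega
  have hd2 : s + 2 * c - (s + c) = c := by omega
  rw [hd1, hd2]
  exact A_window h c s (by omega)

theorem A_inner (h : List Int) (c : Nat) :
    (((PySem.List.pyRange (2 * (c : Int)) ((h.length : Int) + 1) 1).any (fun e =>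
        PySem.List.slice h (some (e - 2 * (c : Int))) (some (e - (c : Int))) ==
          PySem.List.slice h (some (e - (c : Int))) (some e))) = true) ↔
      ∃ s : Nat, s + 2 * c ≤ h.length ∧ ∀ j, j < c → mAt h c (s + j) = true := by
  rw [List.any_eq_true]
  constructor
  · rintro ⟨e, he, hp⟩
    rw [PySem.List.mem_pyRange_one] at he
    refine ⟨(e - 2 * (c : Int)).toNat, by omega, (A_pred_iff h c e (by omega) (by omega)).mp hp⟩
  · rintro ⟨s, hsn, hw⟩
    refine ⟨((s : Int) + 2 * c), PySem.List.mem_pyRange_one.mpr ⟨by omega, by omega⟩, ?_⟩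
    apply (A_pred_iff h c ((s : Int) + 2 * c) (by omega) (by omega)).mpr
    have : ((s : Int) + 2 * c - 2 * (c : Int)).toNat = s := by omega
    rw [this]; exact hw

theorem B_inner (h : List Int) (c : Nat) (hcn : c ≤ h.length) :
    ((PySem.List.pyRange 0 ((h.length : Int) - (c : Int)) 1).foldl
        (fun st i =>
          if st.1 then st
          else if PySem.List.pyGetD h i 0 == PySem.List.pyGetD h (i + (c : Int)) 0 then
            if (c : Int) ≤ st.2 + 1 then (true, st.2 + 1) else (false, st.2 + 1)
          else (false, (0 : Int)))
        (false, (0 : Int))).1 = fndN h c (h.length - c) := by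
  have h1 : (h.length : Int) - (c : Int) = ((h.length - c : Nat) : Int) := by omega
  rw [h1, PySem.List.pyRange_zero_natCast, List.foldl_map]
  have hstep : (fun (st : Bool × Int) (j : Nat) =>
      if st.1 then st
      else if PySem.List.pyGetD h (j : Int) 0 == PySem.List.pyGetD h ((j : Int) + (c : Int)) 0 then
        if (c : Int) ≤ st.2 + 1 then (true, st.2 + 1) else (false, st.2 + 1)
      else (false, (0 : Int))) = stepB h c := by
    funext st j
    have : (j : Int) + (c : Int) = ((j + c : Nat) : Int) := by push_cast; ring
    rw [this, PySem.List.pyGetD_natCast, PySem.List.pyGetD_natCast]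
    rfl
  rw [hstep]
  exact (foldB_inv h c (h.length - c)).1

theorem branch_eq (h : List Int) (c : Nat) (hc : 0 < c) (hc4 : c ≤ 4) (h8 : 8 ≤ h.length) :
    (if (h.length : Int) < 2 * (c : Int) then false
     else (PySem.List.pyRange (2 * (c : Int)) ((h.length : Int) + 1) 1).any (fun e =>
        PySem.List.slice h (some (e - 2 * (c : Int))) (some (e - (c : Int))) ==
          PySem.List.slice h (some (e - (c : Int))) (some e))) =
    ((PySem.List.pyRange 0 ((h.length : Int) - (c : Int)) 1).foldl
        (fun st i =>
          if st.1 then st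
          else if PySem.List.pyGetD h i 0 == PySem.List.pyGetD h (i + (c : Int)) 0 then
            if (c : Int) ≤ st.2 + 1 then (true, st.2 + 1) else (false, st.2 + 1)
          else (false, (0 : Int)))
        (false, (0 : Int))).1 := by
  rw [if_neg (by omega), B_inner h c (by omega), Bool.eq_iff_iff, A_inner h c,
    fndN_iff h c hc (h.length - c)]
  constructor <;> rintro ⟨s, hs, hw⟩ <;> exact ⟨s, by omega, hw⟩

-- ===== VERDICT (by name: the statement is the Claim_ definition above) =====
theorem detect_peak_cycle_py_spec : Claim_equal_detect_peak_cycle_py := by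
  intro h _
  unfold Spec_detect_peak_cycle_py detect_peak_cycle_py detect_peak_cycle_py_alt
  by_cases h8 : h.length < 8
  · simp [h8]
  · have h8' : 8 ≤ h.length := by omega
    simp only [if_neg h8]
    have hr : PySem.List.pyRange 1 5 1 = [1, 2, 3, 4] := by decide
    rw [hr]
    simp only [List.any_cons, List.any_nil, Bool.or_false]
    have e1 := branch_eq h 1 (by norm_num) (by norm_num) h8'
    have e2 := branch_eq h 2 (by norm_num) (by norm_num) h8'
    have e3 := branch_eq h 3 (by norm_num) (by norm_num) h8'
    have e4 := branch_eq h 4 (by norm_num) (by norm_num) h8'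
    push_cast at e1 e2 e3 e4
    norm_num at e1 e2 e3 e4 ⊢
    rw [e1, e2, e3, e4]
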